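-- pv_equiv track=rewrite | github.com/rnacond/rnacond | src/dataops/data_utils.py | sequence_to_anndata
-- ===== SOURCE A (Python) =====
-- from typing import Union
-- from typing import Optional
--
-- def sequence_to_anndata(sequence: list[str],
--                         gene_order: Union[dict[str, int], list[str]],
--                         metadata_tokens_per_column: Optional[dict[str, list[str]]] = None
--                         ) -> tuple[list[int], Union[None, dict[str, list[str]]]]:
--     """counts genes in a sequence of genes
--
--     Args:
--         sequence (list[str]): sequence
--         gene_order(Union[dict[str, int], list[str]]): gene to index dict or gene list in the same order
--         metadata_tokens_per_column (Optional[dict[str, list[str]]]): known metadata tokens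
--     Returns:
--         list[int]: list of gene counts
--         Union[None, dict[str, list[str]]]]: metadata if metadata_tokens_per_column is provided
--     """
--     gtoi = gene_order if isinstance(gene_order, dict) else { gene : i for i, gene in enumerate(gene_order) }
--     counts = [0] * len(gtoi)
--     metadata = {metadata_column : 'unknown' for metadata_column in metadata_tokens_per_column.keys()} if metadata_tokens_per_column is not None else None
--     for token in sequence:
--         idx = gtoi.get(token)
--         if idx is not None:
--             counts[idx] += 1
--         if metadata_tokens_per_column is not None:
--             for metadata_column, metadata_column_tokens in metadata_tokens_per_column.items():
--                 if token in metadata_column_tokens: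
--                     metadata[metadata_column] = token
--     return counts, metadata
-- ===== SOURCE B (Python) =====
-- from typing import Union
-- from typing import Optional
--
-- def sequence_to_anndata(sequence: list[str],
--                         gene_order: Union[dict[str, int], list[str]],
--                         metadata_tokens_per_column: Optional[dict[str, list[str]]] = None
--                         ) -> tuple[list[int], Union[None, dict[str, list[str]]]]:
--     gtoi = gene_order if isinstance(gene_order, dict) else {gene: i for i, gene in enumerate(gene_order)}
--     # one pass over the sequence: frequency of every token
--     freq = {}
--     for token in sequence:
--         freq[token] = freq.get(token, 0) + 1
--     # aggregate per gene instead of per occurrence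
--     counts = [0] * len(gtoi)
--     for gene, idx in gtoi.items():
--         c = freq.get(gene, 0)
--         if c:
--             counts[idx] += c
--     if metadata_tokens_per_column is None:
--         return counts, None
--     metadata = {column: 'unknown' for column in metadata_tokens_per_column}
--     # reverse index token -> columns, built once
--     rev = {}
--     for column, column_tokens in metadata_tokens_per_column.items():
--         for t in column_tokens:
--             rev.setdefault(t, []).append(column)
--     for token in sequence:
--         for column in rev.get(token, ()):
--             metadata[column] = token
--     return counts, metadata
-- ===== Notes on version B (the rewrite author's own statement) =====
-- stated objective: alternative
-- what changed: B builds a token-frequency table in one pass and aggregates counts per gene, and builds a reverse index token->columns once instead of scanning every metadata column's token list for every sequence token.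
import Mathlib
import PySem

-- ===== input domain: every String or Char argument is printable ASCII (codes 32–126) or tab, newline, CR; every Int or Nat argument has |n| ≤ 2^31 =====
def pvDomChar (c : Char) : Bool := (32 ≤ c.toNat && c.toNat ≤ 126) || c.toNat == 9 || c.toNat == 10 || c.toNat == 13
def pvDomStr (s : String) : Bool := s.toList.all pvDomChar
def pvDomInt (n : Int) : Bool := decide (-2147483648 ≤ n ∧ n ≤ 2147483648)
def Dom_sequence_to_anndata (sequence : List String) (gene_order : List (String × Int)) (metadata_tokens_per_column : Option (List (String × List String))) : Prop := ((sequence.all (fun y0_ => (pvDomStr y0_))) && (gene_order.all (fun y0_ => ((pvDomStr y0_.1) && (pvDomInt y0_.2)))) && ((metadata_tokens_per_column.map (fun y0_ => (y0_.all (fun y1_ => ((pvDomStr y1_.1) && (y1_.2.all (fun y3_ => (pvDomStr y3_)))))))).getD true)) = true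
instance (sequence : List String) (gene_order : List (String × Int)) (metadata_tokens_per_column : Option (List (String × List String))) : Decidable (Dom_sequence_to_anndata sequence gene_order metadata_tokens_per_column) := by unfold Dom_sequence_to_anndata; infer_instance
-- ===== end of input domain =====

-- B replaces A's per-token scan over all metadata columns by a reverse index token → columns built once,
-- and counts per gene from a one-pass token frequency table instead of per occurrence (objective: alternative).

-- ===== PORT A =====
-- A-side helper: one step of A's loop on counts ('idx = gtoi.get(token); if idx is not None: counts[idx] += 1')
def pvCountStep (gtoi : PySem.Dict String Int) (cs : List Int) (token : String) : List Int :=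
  match gtoi.get? token with
  | some idx => PySem.List.pySetD cs idx (PySem.List.pyGetD cs idx 0 + 1)
  | none => cs

def sequence_to_anndata (sequence : List String) (gene_order : List (String × Int)) (metadata_tokens_per_column : Option (List (String × List String))) : List Int × (Option (List (String × String))) :=
  let gtoi := PySem.Dict.ofList gene_order
  let counts0 : List Int := List.replicate gtoi.size 0
  let metadata0 : Option (PySem.Dict String String) :=
    metadata_tokens_per_column.map (fun d =>
      (PySem.Dict.ofList d).keys.foldl (fun m col => m.insert col "unknown") PySem.Dict.empty)
  let st := sequence.foldl (fun (st : List Int × Option (PySem.Dict String String)) token =>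
      (pvCountStep gtoi st.1 token,  -- counts[idx] += 1 (in range under Pre_)
       (match metadata_tokens_per_column with
        | some d => st.2.map (fun m => (PySem.Dict.ofList d).items.foldl
            (fun m p => if p.2.contains token then m.insert p.1 token else m) m)
        | none => st.2)))
    (counts0, metadata0)
  (st.1, st.2.map PySem.Dict.items)

-- ===== PORT B =====
def sequence_to_anndata_alt (sequence : List String) (gene_order : List (String × Int)) (metadata_tokens_per_column : Option (List (String × List String))) : List Int × (Option (List (String × String))) :=
  let gtoi := PySem.Dict.ofList gene_order
  let freq := sequence.foldl (fun d t => d.insert t (d.getD t 0 + 1)) (PySem.Dict.empty : PySem.Dict String Int)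
  let counts := gtoi.items.foldl (fun cs p =>
      let c := freq.getD p.1 0
      if c ≠ 0 then PySem.List.pySetD cs p.2 (PySem.List.pyGetD cs p.2 0 + c) else cs)  -- counts[idx] += c
    (List.replicate gtoi.size 0)
  match metadata_tokens_per_column with
  | none => (counts, none)
  | some d =>
    let md := PySem.Dict.ofList d
    let metadata0 := md.keys.foldl (fun m col => m.insert col "unknown") (PySem.Dict.empty : PySem.Dict String String)
    let rev := md.items.foldl (fun r p => p.2.foldl (fun r t => r.insert t (r.getD t [] ++ [p.1])) r)
      (PySem.Dict.empty : PySem.Dict String (List String))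
    let metadata := sequence.foldl (fun m token =>
        (rev.getD token []).foldl (fun m col => m.insert col token) m) metadata0
    (counts, some metadata.items)

-- ===== PRECONDITION & SPEC =====
-- Pre_ excludes exactly the inputs on which Python A raises IndexError: a sequence token mapped by the
-- gene dict to an index outside [-len, len) of the counts list. (The Lean ports both model that raising
-- update as a no-op, so the equality theorem below holds without using Pre_; Pre_ marks where Python A,
-- and Python B alike, raise instead of returning.)
def Pre_sequence_to_anndata (sequence : List String) (gene_order : List (String × Int)) (metadata_tokens_per_column : Option (List (String × List String))) : Prop :=
  ∀ t ∈ sequence, ((PySem.Dict.ofList gene_order).get? t).all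
    (fun v => decide (-((PySem.Dict.ofList gene_order).size : Int) ≤ v ∧ v < ((PySem.Dict.ofList gene_order).size : Int))) = true
instance (sequence : List String) (gene_order : List (String × Int)) (metadata_tokens_per_column : Option (List (String × List String))) : Decidable (Pre_sequence_to_anndata sequence gene_order metadata_tokens_per_column) := by unfold Pre_sequence_to_anndata; infer_instance

def pvWitness_sequence_to_anndata : List String × (List (String × Int)) × (Option (List (String × List String))) :=
  (["g1", "m1", "g1"], [("g1", 0), ("g2", 1)], some [("c1", ["m1", "m2"])])

def Spec_sequence_to_anndata (sequence : List String) (gene_order : List (String × Int)) (metadata_tokens_per_column : Option (List (String × List String))) (out : List Int × (Option (List (String × String)))) : Prop := out = sequence_to_anndata_alt sequence gene_order metadata_tokens_per_column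
instance (sequence : List String) (gene_order : List (String × Int)) (metadata_tokens_per_column : Option (List (String × List String))) (out : List Int × (Option (List (String × String)))) : Decidable (Spec_sequence_to_anndata sequence gene_order metadata_tokens_per_column out) := by unfold Spec_sequence_to_anndata; infer_instance

-- ===== CLAIM (what is proved, stated in full; the proofs are below) =====
def Claim_equal_sequence_to_anndata : Prop := ∀ (sequence : List String) (gene_order : List (String × Int)) (metadata_tokens_per_column : Option (List (String × List String))), Dom_sequence_to_anndata sequence gene_order metadata_tokens_per_column → Pre_sequence_to_anndata sequence gene_order metadata_tokens_per_column → Spec_sequence_to_anndata sequence gene_order metadata_tokens_per_column (sequence_to_anndata sequence gene_order metadata_tokens_per_column)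

-- ===== LEMMAS AND PROOFS =====

-- the contribution of one sequence token to counts[k] in A's loop
def pvDeltaA (gtoi : PySem.Dict String Int) (n : Nat) (k : Nat) (t : String) : Int :=
  match gtoi.get? t with
  | some i => if PySem.List.pyIdx? n i = some k then 1 else 0
  | none => 0

theorem pvIdx_lt {n : Nat} {i : Int} {k : Nat} (h : PySem.List.pyIdx? n i = some k) : k < n := by
  unfold PySem.List.pyIdx? at h
  split_ifs at h with h1 h2 h3 <;> simp_all <;> omega

theorem pvAdd_len (xs : List Int) (i v : Int) :
    (PySem.List.pySetD xs i v).length = xs.length := by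
  simp [pysem]

theorem pvAdd_getD (xs : List Int) (i c : Int) (k : Nat) (hk : k < xs.length) :
    (PySem.List.pySetD xs i (PySem.List.pyGetD xs i 0 + c)).getD k 0
      = xs.getD k 0 + (if PySem.List.pyIdx? xs.length i = some k then c else 0) := by
  cases h : PySem.List.pyIdx? xs.length i with
  | none => simp [PySem.List.pySetD, PySem.List.pySet?, h]
  | some m =>
    have hm : m < xs.length := pvIdx_lt h
    simp [PySem.List.pySetD, PySem.List.pySet?, PySem.List.pyGetD, PySem.List.pyGet?, h,
      List.getD_eq_getElem?_getD, List.getElem?_set, hm]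
    by_cases hmk : m = k
    · subst hmk
      simp [hm]
    · simp [hmk]

theorem pvA_len (gtoi : PySem.Dict String Int) (seq : List String) :
    ∀ cs : List Int,
    (seq.foldl (pvCountStep gtoi) cs).length = cs.length := by
  induction seq with
  | nil => intro cs; rfl
  | cons t rest ih =>
    intro cs
    simp only [List.foldl_cons]
    cases h : gtoi.get? t with
    | none => simp only [pvCountStep, h]; rw [ih]
    | some idx => simp only [pvCountStep, h]; rw [ih, pvAdd_len]

theorem pvA_getD (gtoi : PySem.Dict String Int) (seq : List String) :
    ∀ (cs : List Int) (k : Nat), k < cs.length →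
    (seq.foldl (pvCountStep gtoi) cs).getD k 0
      = cs.getD k 0 + (seq.map (pvDeltaA gtoi cs.length k)).sum := by
  induction seq with
  | nil => intro cs k hk; simp
  | cons t rest ih =>
    intro cs k hk
    simp only [List.foldl_cons, List.map_cons, List.sum_cons]
    cases h : gtoi.get? t with
    | none =>
      simp only [pvCountStep, h]
      rw [ih cs k hk]
      simp [pvDeltaA, h]
    | some idx =>
      simp only [pvCountStep, h]
      have hlen := pvAdd_len cs idx (PySem.List.pyGetD cs idx 0 + 1)
      rw [ih _ k (by rw [hlen]; exact hk)]
      rw [pvAdd_getD cs idx 1 k hk, hlen]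
      simp [pvDeltaA, h]
      ring

theorem pvB_len (freq : PySem.Dict String Int) (L : List (String × Int)) :
    ∀ cs : List Int,
    (L.foldl (fun cs p =>
      let c := freq.getD p.1 0
      if c ≠ 0 then PySem.List.pySetD cs p.2 (PySem.List.pyGetD cs p.2 0 + c) else cs) cs).length = cs.length := by
  induction L with
  | nil => intro cs; rfl
  | cons p rest ih =>
    intro cs
    simp only [List.foldl_cons]
    by_cases h : freq.getD p.1 0 = 0
    · rw [if_neg (by simp [h])]; exact ih cs
    · rw [if_pos (by simp [h])]; rw [ih]; exact pvAdd_len _ _ _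

theorem pvB_getD (freq : PySem.Dict String Int) (L : List (String × Int)) :
    ∀ (cs : List Int) (k : Nat), k < cs.length →
    (L.foldl (fun cs p =>
      let c := freq.getD p.1 0
      if c ≠ 0 then PySem.List.pySetD cs p.2 (PySem.List.pyGetD cs p.2 0 + c) else cs) cs).getD k 0
      = cs.getD k 0 + (L.map (fun p => if PySem.List.pyIdx? cs.length p.2 = some k then freq.getD p.1 0 else 0)).sum := by
  induction L with
  | nil => intro cs k hk; simp
  | cons p rest ih =>
    intro cs k hk
    simp only [List.foldl_cons, List.map_cons, List.sum_cons]
    by_cases h : freq.getD p.1 0 = 0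
    · rw [if_neg (by simp [h])]
      rw [ih cs k hk]
      simp [h]
    · rw [if_pos (by simp [h])]
      have hlen := pvAdd_len cs p.2 (PySem.List.pyGetD cs p.2 0 + freq.getD p.1 0)
      rw [ih _ k (by rw [hlen]; exact hk)]
      rw [pvAdd_getD cs p.2 (freq.getD p.1 0) k hk, hlen]
      ring

theorem pvFreq (seq : List String) (g : String) :
    (seq.foldl (fun d t => d.insert t (d.getD t 0 + 1)) (PySem.Dict.empty : PySem.Dict String Int)).getD g 0
      = (seq.count g : Int) := by
  rw [PySem.Dict.getD_foldl_insert_add_one]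
  simp

theorem pvSpike (n k : Nat) (t : String) :
    ∀ (L : List (String × Int)), (L.map Prod.fst).Nodup →
    (L.map (fun p => if PySem.List.pyIdx? n p.2 = some k ∧ p.1 = t then (1 : Int) else 0)).sum
      = pvDeltaA (PySem.Dict.mk L) n k t := by
  intro L
  induction L with
  | nil => intro _; simp [pvDeltaA]; rfl
  | cons q rest ih =>
    intro hnd
    simp only [List.map_cons, List.sum_cons]
    rw [pvDeltaA, PySem.Dict.get?_mk_cons]
    by_cases hq : q.1 = t
    · subst hq
      simp only [beq_self_eq_true, if_true]
      have hrest : ∀ p ∈ rest, (if PySem.List.pyIdx? n p.2 = some k ∧ p.1 = q.1 then (1:Int) else 0) = 0 := by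
        intro p hp
        have : p.1 ≠ q.1 := by
          intro he
          have := (List.nodup_cons.mp hnd).1
          exact this (he ▸ List.mem_map_of_mem hp)
        simp [this]
      rw [List.sum_eq_zero (by intro x hx; rw [List.mem_map] at hx; obtain ⟨p, hp, rfl⟩ := hx; exact hrest p hp)]
      by_cases hc : PySem.List.pyIdx? n q.2 = some k <;> simp [hc]
    · have hne : (q.1 == t) = false := by simp [hq]
      rw [hne]
      simp only [Bool.false_eq_true, if_false]
      have := ih (List.nodup_cons.mp hnd).2
      rw [pvDeltaA] at this
      rw [if_neg (by tauto), zero_add]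
      exact this

theorem pvExchange (n k : Nat) (L : List (String × Int)) (hnd : (L.map Prod.fst).Nodup) :
    ∀ seq : List String,
    (seq.map (pvDeltaA (PySem.Dict.mk L) n k)).sum
      = (L.map (fun p => if PySem.List.pyIdx? n p.2 = some k then (seq.count p.1 : Int) else 0)).sum := by
  intro seq
  induction seq with
  | nil => simp
  | cons t rest ih =>
    simp only [List.map_cons, List.sum_cons]
    have hcnt : ∀ p : String × Int,
        (if PySem.List.pyIdx? n p.2 = some k then (((t :: rest).count p.1 : Nat) : Int) else 0)
        = (if PySem.List.pyIdx? n p.2 = some k then ((rest.count p.1 : Nat) : Int) else 0)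
          + (if PySem.List.pyIdx? n p.2 = some k ∧ p.1 = t then (1:Int) else 0) := by
      intro p
      by_cases hc : PySem.List.pyIdx? n p.2 = some k
      · simp only [hc, if_true, true_and]
        rw [List.count_cons]
        by_cases hp : p.1 = t
        · simp [hp]
        · have : (t == p.1) = false := by simp; intro he; exact hp he.symm
          simp [this, hp]
      · simp [hc]
    calc pvDeltaA (PySem.Dict.mk L) n k t + (rest.map (pvDeltaA (PySem.Dict.mk L) n k)).sum
        = pvDeltaA (PySem.Dict.mk L) n k t
          + (L.map (fun p => if PySem.List.pyIdx? n p.2 = some k then (rest.count p.1 : Int) else 0)).sum := by rw [ih]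
      _ = (L.map (fun p => if PySem.List.pyIdx? n p.2 = some k then (rest.count p.1 : Int) else 0)).sum
          + (L.map (fun p => if PySem.List.pyIdx? n p.2 = some k ∧ p.1 = t then (1:Int) else 0)).sum := by
            rw [pvSpike n k t L hnd]; ring
      _ = (L.map (fun p => if PySem.List.pyIdx? n p.2 = some k then ((t :: rest).count p.1 : Int) else 0)).sum := by
            rw [← PySem.List.sum_map_add_int]
            congr 1
            apply List.map_congr_left
            intro p _
            rw [hcnt p]

theorem pvListEq (xs ys : List Int) (hl : xs.length = ys.length)
    (h : ∀ k, k < xs.length → xs.getD k 0 = ys.getD k 0) : xs = ys := by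
  apply List.ext_getElem hl
  intro k h1 h2
  have := h k h1
  rwa [List.getD_eq_getElem xs 0 h1, List.getD_eq_getElem ys 0 h2] at this

theorem pvCounts (sequence : List String) (gene_order : List (String × Int)) :
    (sequence.foldl (pvCountStep (PySem.Dict.ofList gene_order)) (List.replicate (PySem.Dict.ofList gene_order).size (0:Int)))
    = ((PySem.Dict.ofList gene_order).items.foldl (fun cs p =>
        let c := (sequence.foldl (fun d t => d.insert t (d.getD t 0 + 1)) (PySem.Dict.empty : PySem.Dict String Int)).getD p.1 0
        if c ≠ 0 then PySem.List.pySetD cs p.2 (PySem.List.pyGetD cs p.2 0 + c) else cs)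
        (List.replicate (PySem.Dict.ofList gene_order).size (0:Int))) := by
  apply pvListEq
  · rw [pvA_len, pvB_len]
  · intro k hk
    rw [pvA_len] at hk
    rw [pvA_getD _ _ _ k hk, pvB_getD _ _ _ k hk]
    congr 1
    have hnd : ((PySem.Dict.ofList gene_order).items.map Prod.fst).Nodup :=
      PySem.Dict.nodup_keys_ofList gene_order
    have hx := pvExchange (List.replicate (PySem.Dict.ofList gene_order).size (0:Int)).length k
      (PySem.Dict.ofList gene_order).items hnd sequence
    rw [hx]
    congr 1
    apply List.map_congr_left
    intro p _
    rw [pvFreq]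

theorem pvFoldOption {α β : Type} (f : α → β → α) (seq : List β) (m0 : α) :
    seq.foldl (fun o t => o.map (fun m => f m t)) (some m0) = some (seq.foldl f m0) := by
  induction seq generalizing m0 with
  | nil => rfl
  | cons t rest ih => simp only [List.foldl_cons, Option.map_some]; exact ih (f m0 t)

theorem pvRepFold (c : Nat) (col tok : String) (m : PySem.Dict String String) :
    (List.replicate c col).foldl (fun m c' => m.insert c' tok) m
      = if c = 0 then m else m.insert col tok := by
  induction c generalizing m with
  | zero => rfl
  | succ c ih =>
    rw [List.replicate_succ, List.foldl_cons, ih]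
    by_cases hc : c = 0
    · simp [hc]
    · simp [hc, PySem.Dict.insert_insert_self]

theorem pvRevInner (t col : String) :
    ∀ (toks : List String) (r : PySem.Dict String (List String)),
    (toks.foldl (fun r s => r.insert s (r.getD s [] ++ [col])) r).getD t []
      = r.getD t [] ++ List.replicate (toks.count t) col := by
  intro toks
  induction toks with
  | nil => intro r; simp
  | cons s rest ih =>
    intro r
    rw [List.foldl_cons, ih, List.count_cons]
    by_cases hst : s = t
    · subst hst
      simp only [PySem.Dict.getD_insert, beq_self_eq_true, if_true, List.append_assoc]
      rw [List.replicate_succ]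
      simp
    · have : (s == t) = false := by simp [hst]
      rw [this]
      simp [PySem.Dict.getD_insert, Ne.symm hst]

theorem pvRevGetD (t : String) :
    ∀ (itemsM : List (String × List String)) (r : PySem.Dict String (List String)),
    (itemsM.foldl (fun r p => p.2.foldl (fun r s => r.insert s (r.getD s [] ++ [p.1])) r) r).getD t []
      = r.getD t [] ++ itemsM.flatMap (fun p => List.replicate (p.2.count t) p.1) := by
  intro itemsM
  induction itemsM with
  | nil => intro r; simp
  | cons p rest ih =>
    intro r
    rw [List.foldl_cons, ih, List.flatMap_cons, pvRevInner]
    rw [List.append_assoc]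

theorem pvStep (token : String) :
    ∀ (itemsM : List (String × List String)) (m : PySem.Dict String String),
    itemsM.foldl (fun m p => if p.2.contains token then m.insert p.1 token else m) m
      = (itemsM.flatMap (fun p => List.replicate (p.2.count token) p.1)).foldl (fun m col => m.insert col token) m := by
  intro itemsM
  induction itemsM with
  | nil => intro m; rfl
  | cons p rest ih =>
    intro m
    rw [List.foldl_cons, List.flatMap_cons, List.foldl_append, ih, pvRepFold]
    by_cases hc : p.2.count token = 0
    · have : p.2.contains token = false := by
        simp only [List.count_eq_zero] at hc
        simpa using hc
      rw [this, hc]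
      simp
    · have : p.2.contains token = true := by
        simp only [List.count_eq_zero] at hc
        simpa using not_not.mp hc
      rw [this]
      simp [hc]

-- ===== VERDICT (by name: the statement is the Claim_ definition above) =====
theorem sequence_to_anndata_spec : Claim_equal_sequence_to_anndata := by
  intro sequence gene_order metadata_tokens_per_column _ _
  unfold Spec_sequence_to_anndata
  unfold sequence_to_anndata sequence_to_anndata_alt
  cases metadata_tokens_per_column with
  | none =>
    simp only [Option.map_none]
    rw [PySem.List.foldl_prod_mk
      (f := pvCountStep (PySem.Dict.ofList gene_order))
      (g := fun (o : Option (PySem.Dict String String)) (_ : String) => o)]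
    simp only [PySem.List.foldl_ignore, Option.map_none]
    rw [pvCounts]
  | some d =>
    simp only [Option.map_some]
    rw [PySem.List.foldl_prod_mk
      (f := pvCountStep (PySem.Dict.ofList gene_order))
      (g := fun (o : Option (PySem.Dict String String)) (token : String) =>
        o.map (fun m => (PySem.Dict.ofList d).items.foldl
          (fun m p => if p.2.contains token then m.insert p.1 token else m) m))]
    rw [pvFoldOption]
    simp only [Option.map_some]
    rw [pvCounts]
    congr 2
    apply congrArg PySem.Dict.items
    apply PySem.List.foldl_congr_mem
    intro m token _
    rw [pvStep]
    congr 1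
    rw [pvRevGetD]
    simp
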